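-- pv_equiv track=rewrite | github.com/Riddhiman2005/Codechef-Solutions | Practice Problems/Little Elephant and Permutations/Code.py | is_good_permutation
-- ===== SOURCE A (Python) =====
-- def is_good_permutation(arr):
--     inversions = 0
--     local_inversions = 0
--
--     for i in range(len(arr)):
--         for j in range(i + 1, len(arr)):
--             if arr[i] > arr[j]:
--                 inversions += 1
--                 if j == i + 1:
--                     local_inversions += 1
--
--     return inversions == local_inversions
-- ===== SOURCE B (Python) =====
-- def is_good_permutation(arr):
--     # One pass: an inversion with gap >= 2 exists iff some element exceeds
--     # the running maximum of everything at least two positions before it.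
--     prefix_max = None
--     for two_back, cur in zip(arr, arr[2:]):
--         if prefix_max is None or two_back > prefix_max:
--             prefix_max = two_back
--         if prefix_max > cur:
--             return False
--     return True
-- ===== Notes on version B (the rewrite author's own statement) =====
-- stated objective: faster
-- what changed: Replaced the O(n^2) double loop counting total vs adjacent inversions by a single pass over zip(arr, arr[2:]) that tracks the running maximum of elements at least two positions back and fails on the first gap>=2 inversion.
import Mathlib
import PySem

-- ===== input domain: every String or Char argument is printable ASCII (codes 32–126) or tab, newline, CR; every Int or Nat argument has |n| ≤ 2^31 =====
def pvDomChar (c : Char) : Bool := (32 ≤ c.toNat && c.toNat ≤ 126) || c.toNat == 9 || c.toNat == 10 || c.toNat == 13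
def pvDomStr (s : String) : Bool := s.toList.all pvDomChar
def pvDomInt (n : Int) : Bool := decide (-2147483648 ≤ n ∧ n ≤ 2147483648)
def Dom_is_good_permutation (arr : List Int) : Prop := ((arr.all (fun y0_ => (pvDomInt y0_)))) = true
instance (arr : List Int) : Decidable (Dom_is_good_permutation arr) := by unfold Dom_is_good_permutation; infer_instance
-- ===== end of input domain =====

-- B replaces A's O(n^2) double inversion count by a single pass over zip(arr, arr[2:])
-- tracking the running maximum of elements at least two positions back (objective: faster).

-- ===== PORT A =====
def is_good_permutation (arr : List Int) : Bool :=
  let n : Int := (arr.length : Int)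
  let s :=
    (PySem.List.pyRange 0 n 1).foldl
      (fun (s : Int × Int) i =>
        (PySem.List.pyRange (i + 1) n 1).foldl
          (fun (s2 : Int × Int) j =>
            if PySem.List.pyGetD arr i 0 > PySem.List.pyGetD arr j 0 then
              (s2.1 + 1, if j == i + 1 then s2.2 + 1 else s2.2)
            else s2)
          s)
      ((0 : Int), (0 : Int))
  s.1 == s.2

-- ===== PORT B =====
-- prefix_max update: `arr[k]` (two back) folded into the running maximum (None at start)
def pvAltStep (pm : Option Int) (tb : Int) : Int :=
  match pm with
  | none => tb
  | some m => if tb > m then tb else m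

-- the `for two_back, cur in zip(arr, arr[2:])` loop with early return False
def pvAltLoop : Option Int → List (Int × Int) → Bool
  | _, [] => true
  | pm, (tb, cur) :: rest =>
    let m := pvAltStep pm tb
    if m > cur then false else pvAltLoop (some m) rest

def is_good_permutation_alt (arr : List Int) : Bool :=
  pvAltLoop none (arr.zip (arr.drop 2))

-- ===== PRECONDITION & SPEC =====
def Spec_is_good_permutation (arr : List Int) (out : Bool) : Prop := out = is_good_permutation_alt arr
instance (arr : List Int) (out : Bool) : Decidable (Spec_is_good_permutation arr out) := by unfold Spec_is_good_permutation; infer_instance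

-- ===== CLAIM (what is proved, stated in full; the proofs are below) =====
def Claim_equal_is_good_permutation : Prop := ∀ (arr : List Int), Dom_is_good_permutation arr → Spec_is_good_permutation arr (is_good_permutation arr)

-- ===== LEMMAS AND PROOFS =====

-- "no inversion with gap ≥ 2": the condition both programs decide
def pvNoFar (arr : List Int) : Prop :=
  ∀ i j : Nat, i + 2 ≤ j → j < arr.length → arr.getD i 0 ≤ arr.getD j 0

-- split a countP by an extra Bool test
lemma pv_countP_split (l : List Int) (p q : Int → Bool) :
    l.countP p = l.countP (fun x => p x && q x) + l.countP (fun x => p x && !q x) := by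
  induction l with
  | nil => simp
  | cons a t ih => by_cases h : p a <;> by_cases h2 : q a <;> simp [h, h2, ih] <;> omega

-- A computes (total inversion count, adjacent inversion count) and compares them
lemma A_eq_counts (arr : List Int) :
    is_good_permutation arr =
      (((PySem.List.pyRange 0 (arr.length : Int) 1).map (fun i =>
          (PySem.List.pyRange (i + 1) (arr.length : Int) 1).countP (fun j =>
            decide (PySem.List.pyGetD arr i 0 > PySem.List.pyGetD arr j 0)))).sum ==
       ((PySem.List.pyRange 0 (arr.length : Int) 1).map (fun i =>
          (PySem.List.pyRange (i + 1) (arr.length : Int) 1).countP (fun j =>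
            decide (PySem.List.pyGetD arr i 0 > PySem.List.pyGetD arr j 0) && (j == i + 1)))).sum) := by
  have h2 : ∀ (s : Int × Int) (i : Int),
      (PySem.List.pyRange (i + 1) (arr.length : Int) 1).foldl
        (fun (s2 : Int × Int) j =>
          if PySem.List.pyGetD arr i 0 > PySem.List.pyGetD arr j 0 then
            (s2.1 + 1, if j == i + 1 then s2.2 + 1 else s2.2)
          else s2) s
      = (s.1 + ((PySem.List.pyRange (i + 1) (arr.length : Int) 1).countP (fun j =>
            decide (PySem.List.pyGetD arr i 0 > PySem.List.pyGetD arr j 0)) : Nat),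
         s.2 + ((PySem.List.pyRange (i + 1) (arr.length : Int) 1).countP (fun j =>
            decide (PySem.List.pyGetD arr i 0 > PySem.List.pyGetD arr j 0) && (j == i + 1)) : Nat)) := by
    intro s i
    obtain ⟨a, b⟩ := s
    have h1 :
        (fun (s2 : Int × Int) (j : Int) =>
          if PySem.List.pyGetD arr i 0 > PySem.List.pyGetD arr j 0 then
            (s2.1 + 1, if j == i + 1 then s2.2 + 1 else s2.2)
          else s2)
        = (fun (s2 : Int × Int) (j : Int) =>
            ((fun (a : Int) (j : Int) => a + (if (decide (PySem.List.pyGetD arr i 0 > PySem.List.pyGetD arr j 0)) = true then (1:Int) else 0)) s2.1 j,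
             (fun (b : Int) (j : Int) => b + (if ((decide (PySem.List.pyGetD arr i 0 > PySem.List.pyGetD arr j 0)) && (j == i + 1)) = true then (1:Int) else 0)) s2.2 j)) := by
      funext s2 j
      by_cases hd : j = i + 1 <;> simp [hd] <;> split_ifs <;> simp
    rw [h1, PySem.List.foldl_prod_mk
          (fun (a : Int) (j : Int) => a + (if (decide (PySem.List.pyGetD arr i 0 > PySem.List.pyGetD arr j 0)) = true then (1:Int) else 0))
          (fun (b : Int) (j : Int) => b + (if ((decide (PySem.List.pyGetD arr i 0 > PySem.List.pyGetD arr j 0)) && (j == i + 1)) = true then (1:Int) else 0)),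
        PySem.List.foldl_add, PySem.List.foldl_add,
        PySem.List.sum_map_ite_one_zero, PySem.List.sum_map_ite_one_zero]
  simp only [is_good_permutation]
  have h3 : (fun (s : Int × Int) (i : Int) =>
      (PySem.List.pyRange (i + 1) (arr.length : Int) 1).foldl
        (fun (s2 : Int × Int) j =>
          if PySem.List.pyGetD arr i 0 > PySem.List.pyGetD arr j 0 then
            (s2.1 + 1, if j == i + 1 then s2.2 + 1 else s2.2)
          else s2) s)
      = (fun (s : Int × Int) (i : Int) =>
          ((fun (a : Int) (i : Int) => a + ((PySem.List.pyRange (i + 1) (arr.length : Int) 1).countP (fun j =>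
              decide (PySem.List.pyGetD arr i 0 > PySem.List.pyGetD arr j 0)) : Nat)) s.1 i,
           (fun (b : Int) (i : Int) => b + ((PySem.List.pyRange (i + 1) (arr.length : Int) 1).countP (fun j =>
              decide (PySem.List.pyGetD arr i 0 > PySem.List.pyGetD arr j 0) && (j == i + 1)) : Nat)) s.2 i)) :=
    funext fun s => funext fun i => h2 s i
  rw [h3, PySem.List.foldl_prod_mk
        (fun (a : Int) (i : Int) => a + ((PySem.List.pyRange (i + 1) (arr.length : Int) 1).countP (fun j =>
            decide (PySem.List.pyGetD arr i 0 > PySem.List.pyGetD arr j 0)) : Nat))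
        (fun (b : Int) (i : Int) => b + ((PySem.List.pyRange (i + 1) (arr.length : Int) 1).countP (fun j =>
            decide (PySem.List.pyGetD arr i 0 > PySem.List.pyGetD arr j 0) && (j == i + 1)) : Nat)),
      PySem.List.foldl_add, PySem.List.foldl_add]
  simp only [zero_add]
  have hcast : ∀ (f : Int → Nat), ((PySem.List.pyRange 0 (arr.length : Int) 1).map (fun i => ((f i : Nat) : Int))).sum = (((PySem.List.pyRange 0 (arr.length : Int) 1).map f).sum : Int) := by
    intro f
    rw [Nat.cast_list_sum, List.map_map]
    rfl
  rw [hcast, hcast, Bool.eq_iff_iff, beq_iff_eq, beq_iff_eq]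
  exact Nat.cast_inj


-- A returns true iff there is no inversion with gap ≥ 2
lemma A_iff (arr : List Int) : is_good_permutation arr = true ↔ pvNoFar arr := by
  rw [A_eq_counts]
  rw [beq_iff_eq]
  have hsplit : ∀ i : Int,
      (PySem.List.pyRange (i + 1) (arr.length : Int) 1).countP (fun j =>
        decide (PySem.List.pyGetD arr i 0 > PySem.List.pyGetD arr j 0))
      = (PySem.List.pyRange (i + 1) (arr.length : Int) 1).countP (fun j =>
          decide (PySem.List.pyGetD arr i 0 > PySem.List.pyGetD arr j 0) && (j == i + 1))
        + (PySem.List.pyRange (i + 1) (arr.length : Int) 1).countP (fun j =>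
          decide (PySem.List.pyGetD arr i 0 > PySem.List.pyGetD arr j 0) && !(j == i + 1)) := by
    intro i
    exact pv_countP_split _ _ (fun j => j == i + 1)
  have hmapeq : ((PySem.List.pyRange 0 (arr.length : Int) 1).map (fun i =>
      (PySem.List.pyRange (i + 1) (arr.length : Int) 1).countP (fun j =>
        decide (PySem.List.pyGetD arr i 0 > PySem.List.pyGetD arr j 0)))).sum
      = ((PySem.List.pyRange 0 (arr.length : Int) 1).map (fun i =>
          (PySem.List.pyRange (i + 1) (arr.length : Int) 1).countP (fun j =>
            decide (PySem.List.pyGetD arr i 0 > PySem.List.pyGetD arr j 0) && (j == i + 1)))).sum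
        + ((PySem.List.pyRange 0 (arr.length : Int) 1).map (fun i =>
          (PySem.List.pyRange (i + 1) (arr.length : Int) 1).countP (fun j =>
            decide (PySem.List.pyGetD arr i 0 > PySem.List.pyGetD arr j 0) && !(j == i + 1)))).sum := by
    rw [← List.sum_map_add]
    exact congrArg List.sum (List.map_congr_left (fun i _ => hsplit i))
  rw [hmapeq]
  constructor
  · intro h
    have hz : ((PySem.List.pyRange 0 (arr.length : Int) 1).map (fun i =>
        (PySem.List.pyRange (i + 1) (arr.length : Int) 1).countP (fun j =>
          decide (PySem.List.pyGetD arr i 0 > PySem.List.pyGetD arr j 0) && !(j == i + 1)))).sum = 0 := by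
      omega
    rw [List.sum_eq_zero_iff] at hz
    intro i j hij hj
    have hmemi : (i : Int) ∈ PySem.List.pyRange 0 (arr.length : Int) 1 := by
      rw [PySem.List.mem_pyRange_one]; omega
    have hcz := hz _ (List.mem_map.mpr ⟨(i : Int), hmemi, rfl⟩)
    rw [List.countP_eq_zero] at hcz
    have hmemj : (j : Int) ∈ PySem.List.pyRange ((i : Int) + 1) (arr.length : Int) 1 := by
      rw [PySem.List.mem_pyRange_one]; omega
    have := hcz _ hmemj
    simp only [PySem.List.pyGetD_natCast, Bool.and_eq_true, decide_eq_true_eq, Bool.not_eq_eq_eq_not, Bool.not_true, beq_eq_false_iff_ne] at this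
    by_contra hlt
    exact this ⟨by omega, by omega⟩
  · intro hnf
    have hz : ((PySem.List.pyRange 0 (arr.length : Int) 1).map (fun i =>
        (PySem.List.pyRange (i + 1) (arr.length : Int) 1).countP (fun j =>
          decide (PySem.List.pyGetD arr i 0 > PySem.List.pyGetD arr j 0) && !(j == i + 1)))).sum = 0 := by
      rw [List.sum_eq_zero_iff]
      intro x hx
      obtain ⟨i, hmi, rfl⟩ := List.mem_map.mp hx
      rw [List.countP_eq_zero]
      intro j hmj
      rw [PySem.List.mem_pyRange_one] at hmi hmj
      have h0i : 0 ≤ i := hmi.1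
      have h0j : 0 ≤ j := by omega
      by_cases hadj : j = i + 1
      · simp [hadj]
      · have hle : arr.getD i.toNat 0 ≤ arr.getD j.toNat 0 := by
          apply hnf
          · omega
          · omega
        rw [PySem.List.pyGetD_of_nonneg arr 0 h0i, PySem.List.pyGetD_of_nonneg arr 0 h0j]
        simp only [Bool.and_eq_true, decide_eq_true_eq, not_and]
        intro hgt
        omega
    omega


-- invariant of B's single pass, with the running maximum generalized
lemma altLoop_iff (xs : List Int) (pm : Option Int) :
    pvAltLoop pm (xs.zip (xs.drop 2)) = true ↔
      ((∀ i j : Nat, i + 2 ≤ j → j < xs.length → xs.getD i 0 ≤ xs.getD j 0) ∧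
       (∀ m, pm = some m → ∀ j : Nat, 2 ≤ j → j < xs.length → m ≤ xs.getD j 0)) := by
  induction xs generalizing pm with
  | nil =>
    simp [pvAltLoop]
  | cons a l ih =>
    match l, ih with
    | [], _ =>
      simp [pvAltLoop]
      constructor
      · intro i j hij hj; omega
      · intro m _ j h2 hj; omega
    | [b], _ =>
      simp [pvAltLoop]
      constructor
      · intro i j hij hj; omega
      · intro m _ j h2 hj; omega
    | b :: c :: t, ih =>
      have hzip : ((a :: b :: c :: t).zip ((a :: b :: c :: t).drop 2)) =
          (a, c) :: ((b :: c :: t).zip ((b :: c :: t).drop 2)) := by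
        simp
      rw [hzip]
      show (if pvAltStep pm a > c then false else pvAltLoop (some (pvAltStep pm a)) ((b :: c :: t).zip ((b :: c :: t).drop 2))) = true ↔ _
      by_cases hgt : pvAltStep pm a > c
      · simp only [hgt, if_pos]
        constructor
        · intro h; exact absurd h (by simp)
        · rintro ⟨hfar, hpm⟩
          exfalso
          -- pvAltStep pm a ≤ c must hold
          have hac : a ≤ c := hfar 0 2 (by omega) (by simp)
          rcases pm with _ | m
          · simp [pvAltStep] at hgt; omega
          · have hmc : m ≤ c := hpm m rfl 2 (by omega) (by simp)
            simp [pvAltStep] at hgt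
            split_ifs at hgt <;> omega
      · simp only [hgt, if_false]
        rw [ih (some (pvAltStep pm a))]
        rw [not_lt] at hgt
        have hstep_ge_a : a ≤ pvAltStep pm a := by
          rcases pm with _ | m <;> simp [pvAltStep] <;> (try split_ifs) <;> omega
        have hstep_ge_m : ∀ m, pm = some m → m ≤ pvAltStep pm a := by
          rintro m rfl
          simp [pvAltStep]; split_ifs <;> omega
        have hstep_cases : pvAltStep pm a = a ∨ pm = some (pvAltStep pm a) := by
          rcases pm with _ | m
          · left; rfl
          · by_cases h : a > m
            · left; simp [pvAltStep, h]
            · right; simp [pvAltStep, h]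
        constructor
        · rintro ⟨hfar, hpm⟩
          constructor
          · -- far condition on a :: b :: c :: t
            intro i j hij hj
            cases i with
            | zero =>
              -- a vs element j ≥ 2
              cases j with
              | zero => omega
              | succ j' =>
                cases j' with
                | zero => omega
                | succ j'' =>
                  -- j = j''+2 ≥ 2; (a::…).getD (j''+2) = (b::c::t).getD (j''+1)
                  simp only [List.getD_cons_succ, List.getD_cons_zero]
                  by_cases hj2 : j'' = 0
                  · subst hj2
                    -- element is c
                    have : pvAltStep pm a ≤ c := hgt
                    simp only [List.getD_cons_zero]
                    omega
                  · -- j'' ≥ 1: use hpm with m := pvAltStep pm a at index j''+1 ≥ 2 in (b::c::t)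
                    have := hpm (pvAltStep pm a) rfl (j'' + 1) (by omega) (by
                      simp at hj ⊢; omega)
                    simp only [List.getD_cons_succ] at this ⊢
                    omega
            | succ i' =>
              have := hfar i' (j - 1) (by omega) (by simp at hj ⊢; omega)
              cases j with
              | zero => omega
              | succ j' =>
                simp only [List.getD_cons_succ]
                simpa using this
          · -- pm condition on a :: b :: c :: t
            rintro m rfl j h2 hj
            have hm_le : m ≤ pvAltStep (some m) a := hstep_ge_m m rfl
            cases j with
            | zero => omega
            | succ j' =>
              cases j' with
              | zero => omega
              | succ j'' =>
                simp only [List.getD_cons_succ]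
                by_cases hj2 : j'' = 0
                · subst hj2; simp only [List.getD_cons_zero]; omega
                · have := hpm (pvAltStep (some m) a) rfl (j'' + 1) (by omega) (by simp at hj ⊢; omega)
                  simp only [List.getD_cons_succ] at this ⊢
                  omega
        · rintro ⟨hfar, hpm⟩
          constructor
          · intro i j hij hj
            have := hfar (i + 1) (j + 1) (by omega) (by simp at hj ⊢; omega)
            simpa using this
          · rintro m hm j h2 hj
            rw [Option.some_inj] at hm
            -- m = pvAltStep pm a; bound element j+1 of the full list
            have hfull : ∀ j : Nat, 2 ≤ j → j < (a :: b :: c :: t).length → pvAltStep pm a ≤ (a :: b :: c :: t).getD j 0 := by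
              intro k h2k hk
              rcases hstep_cases with hca | hcm
              · rw [hca]
                have := hfar 0 k (by omega) hk
                simpa using this
              · exact hpm _ hcm k h2k hk
            have := hfull (j + 1) (by omega) (by simp at hj ⊢; omega)
            rw [← hm]
            simpa using this


lemma B_iff (arr : List Int) : is_good_permutation_alt arr = true ↔ pvNoFar arr := by
  rw [is_good_permutation_alt, altLoop_iff]
  unfold pvNoFar
  simp

-- ===== VERDICT (by name: the statement is the Claim_ definition above) =====
theorem is_good_permutation_spec : Claim_equal_is_good_permutation := by
  intro arr _
  unfold Spec_is_good_permutation
  rw [Bool.eq_iff_iff, A_iff, B_iff]
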